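-- pv_equiv track=rewrite | github.com/vaibhav-jain-dev/learning-algo | problems/200-must-solve/arrays/10-monotonic-array/similar/02-minimum-removals-monotonic/python_code.py | min_removals_pythonic
-- ===== SOURCE A (Python) =====
-- from typing import List
--
-- def min_removals_pythonic(array: List[int]) -> int:
--     """
--     More Pythonic version using enumerate and comprehensions.
--     """
--     if len(array) <= 1:
--         return 0
--
--     n = len(array)
--
--     # LNDS using comprehension
--     dp_inc = [1] * n
--     for i, val in enumerate(array):
--         if i > 0:
--             dp_inc[i] = 1 + max(
--                 (dp_inc[j] for j, prev in enumerate(array[:i]) if val >= prev),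
--                 default=0
--             )
--
--     # LNIS using comprehension
--     dp_dec = [1] * n
--     for i, val in enumerate(array):
--         if i > 0:
--             dp_dec[i] = 1 + max(
--                 (dp_dec[j] for j, prev in enumerate(array[:i]) if val <= prev),
--                 default=0
--             )
--
--     return n - max(max(dp_inc), max(dp_dec))
-- ===== SOURCE B (Python) =====
-- from typing import List
-- from bisect import bisect_right
--
-- def min_removals_pythonic(array: List[int]) -> int:
--     """Patience sorting: O(n log n) longest non-decreasing / non-increasing subsequence."""
--     def lnds(a):
--         tails = []
--         for x in a:
--             pos = bisect_right(tails, x)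
--             if pos == len(tails):
--                 tails.append(x)
--             else:
--                 tails[pos] = x
--         return len(tails)
--     return len(array) - max(lnds(array), lnds([-x for x in array]))
-- ===== Notes on version B (the rewrite author's own statement) =====
-- stated objective: faster
-- what changed: Replaced the two O(n^2) DP passes (each entry scans the whole prefix) by patience sorting: one bisect-maintained tails list per direction gives the longest non-decreasing / non-increasing subsequence lengths in O(n log n).
import Mathlib
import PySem

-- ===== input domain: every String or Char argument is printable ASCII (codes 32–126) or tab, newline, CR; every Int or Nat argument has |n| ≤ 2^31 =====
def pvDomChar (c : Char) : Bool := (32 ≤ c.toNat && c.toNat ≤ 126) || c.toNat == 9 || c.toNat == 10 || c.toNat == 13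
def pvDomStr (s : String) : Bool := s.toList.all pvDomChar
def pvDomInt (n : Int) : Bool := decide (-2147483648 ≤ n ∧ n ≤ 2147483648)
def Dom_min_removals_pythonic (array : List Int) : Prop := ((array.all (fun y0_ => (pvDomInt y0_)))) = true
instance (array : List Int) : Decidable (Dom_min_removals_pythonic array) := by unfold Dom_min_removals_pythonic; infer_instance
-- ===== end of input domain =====

-- B replaces A's two O(n^2) DP passes by patience sorting (a bisect-maintained tails list per direction); equal return value on every input.

-- ===== PORT A =====
-- comparator 'val >= prev' of the dp_inc loop
def pvGeCmp (v prev : Int) : Bool := prev ≤ v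
-- comparator 'val <= prev' of the dp_dec loop
def pvLeCmp (v prev : Int) : Bool := v ≤ prev

-- loop body: 'if i > 0: dp[i] = 1 + max((dp[j] for j, prev in enumerate(array[:i]) if cmp(val, prev)), default=0)'
-- (dp[i] assignment: i is always in range, pySetD is exact there; max(gen, default=0) is PySem.List.maxD)
def pvStepA (cmp : Int → Int → Bool) (array : List Int) (dp : List Int) (iv : Int × Int) : List Int :=
  if iv.1 > 0 then
    PySem.List.pySetD dp iv.1
      (1 + PySem.List.maxD
        ((PySem.List.enumerate (PySem.List.slice array none (some iv.1))).filterMap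
          (fun jp => if cmp iv.2 jp.2 then some (PySem.List.pyGetD dp jp.1 0) else none))
        (fun x => x) 0)
  else dp

-- 'dp = [1] * n; for i, val in enumerate(array): …'
def pvBuildDp (cmp : Int → Int → Bool) (array : List Int) : List Int :=
  (PySem.List.enumerate array).foldl (pvStepA cmp array) (List.replicate array.length 1)

def min_removals_pythonic (array : List Int) : Int :=
  if array.length ≤ 1 then 0
  else
    let dp_inc := pvBuildDp pvGeCmp array
    let dp_dec := pvBuildDp pvLeCmp array
    -- max(dp_inc) on a NONEMPTY list (n ≥ 2 here), so maxD with default 0 is exact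
    (array.length : Int) -
      max (PySem.List.maxD dp_inc (fun x => x) 0) (PySem.List.maxD dp_dec (fun x => x) 0)

-- ===== PORT B =====
-- one step of B's lnds loop: pos = bisect_right(tails, x); append or replace
def pvTailsStep (t : List Int) (x : Int) : List Int :=
  let pos := PySem.List.bisectRight t x
  if pos = t.length then t ++ [x] else t.set pos x

-- B's helper lnds(a), returning the tails list (its length is the LNDS length)
def pvLnds (a : List Int) : List Int := a.foldl pvTailsStep []

def min_removals_pythonic_alt (array : List Int) : Int :=
  (array.length : Int) -
    max ((pvLnds array).length : Int) ((pvLnds (array.map (fun x => -x))).length : Int)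

-- ===== PRECONDITION & SPEC =====
def Spec_min_removals_pythonic (array : List Int) (out : Int) : Prop := out = min_removals_pythonic_alt array
instance (array : List Int) (out : Int) : Decidable (Spec_min_removals_pythonic array out) := by unfold Spec_min_removals_pythonic; infer_instance

-- ===== CLAIM (what is proved, stated in full; the proofs are below) =====
def Claim_equal_min_removals_pythonic : Prop := ∀ (array : List Int), Dom_min_removals_pythonic array → Spec_min_removals_pythonic array (min_removals_pythonic array)

-- ===== LEMMAS AND PROOFS =====

-- pvMr cmp r v: value of the dp recurrence on the REVERSED prefix r; cmp v x = "x may precede v"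
def pvMr (cmp : Int → Int → Bool) : List Int → Int → Int
  | [], _ => 0
  | x :: r, v => if cmp v x then max (pvMr cmp r v) (1 + pvMr cmp r x) else pvMr cmp r v

-- pvM cmp p v = max dp value over elements of prefix p that may precede v (0 if none)
def pvM (cmp : Int → Int → Bool) (p : List Int) (v : Int) : Int := pvMr cmp p.reverse v

-- the dp list A's loop produces on prefix p, in closed form
def pvDpIdeal (cmp : Int → Int → Bool) (p : List Int) : List Int :=
  (List.range p.length).map (fun k => 1 + pvM cmp (p.take k) (p.getD k 0))

-- max of the dp list (the LNDS/LNIS length), 0 for the empty prefix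
def pvMtop (cmp : Int → Int → Bool) (p : List Int) : Int :=
  PySem.List.maxD (pvDpIdeal cmp p) (fun x => x) 0

theorem pvM_nil (cmp : Int → Int → Bool) (v : Int) : pvM cmp [] v = 0 := rfl

theorem pvM_snoc (cmp : Int → Int → Bool) (p : List Int) (x v : Int) :
    pvM cmp (p ++ [x]) v = if cmp v x then max (pvM cmp p v) (1 + pvM cmp p x) else pvM cmp p v := by
  simp [pvM, pvMr]

theorem pvMr_nonneg (cmp : Int → Int → Bool) (r : List Int) (v : Int) : 0 ≤ pvMr cmp r v := by
  induction r generalizing v with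
  | nil => simp [pvMr]
  | cons x r ih => simp only [pvMr]; split_ifs <;> simp [ih]

theorem pvM_nonneg (cmp : Int → Int → Bool) (p : List Int) (v : Int) : 0 ≤ pvM cmp p v :=
  pvMr_nonneg cmp p.reverse v

theorem pvDpIdeal_nil (cmp : Int → Int → Bool) : pvDpIdeal cmp [] = [] := rfl

theorem pvDpIdeal_length (cmp : Int → Int → Bool) (p : List Int) :
    (pvDpIdeal cmp p).length = p.length := by simp [pvDpIdeal]

theorem pvDpIdeal_getElem (cmp : Int → Int → Bool) (p : List Int) (k : Nat)
    (hk : k < (pvDpIdeal cmp p).length) :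
    (pvDpIdeal cmp p)[k] = 1 + pvM cmp (p.take k) (p.getD k 0) := by
  simp [pvDpIdeal]

theorem pvDpIdeal_snoc (cmp : Int → Int → Bool) (p : List Int) (x : Int) :
    pvDpIdeal cmp (p ++ [x]) = pvDpIdeal cmp p ++ [1 + pvM cmp p x] := by
  unfold pvDpIdeal
  have hlen : (p ++ [x]).length = p.length + 1 := by simp
  rw [hlen, List.range_succ, List.map_append]
  congr 1
  · refine List.map_congr_left ?_
    intro k hk
    rw [List.mem_range] at hk
    have h1 : (p ++ [x]).take k = p.take k := List.take_append_of_le_length (le_of_lt hk)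
    have h2 : (p ++ [x]).getD k 0 = p.getD k 0 := by
      rw [List.getD_eq_getElem _ _ (by simp; omega), List.getD_eq_getElem _ _ hk,
        List.getElem_append_left hk]
    rw [h1, h2]
  · have h1 : (p ++ [x]).take p.length = p := List.take_left
    simp [h1]

theorem pvMaxD_append_singleton (l : List Int) (a : Int) (h : 0 ≤ a) :
    PySem.List.maxD (l ++ [a]) (fun x => x) 0 = max (PySem.List.maxD l (fun x => x) 0) a := by
  cases l with
  | nil => simp [PySem.List.maxD, PySem.List.max?]; omega
  | cons b l' =>
    obtain ⟨m, hm⟩ : ∃ m, PySem.List.max? ((b :: l') ++ [a]) (fun x : Int => x) = some m := by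
      cases hcase : PySem.List.max? ((b :: l') ++ [a]) (fun x : Int => x) with
      | none => simp [PySem.List.max?_eq_none_iff] at hcase
      | some m => exact ⟨m, rfl⟩
    obtain ⟨m', hm'⟩ : ∃ m', PySem.List.max? (b :: l') (fun x : Int => x) = some m' := by
      cases hcase : PySem.List.max? (b :: l') (fun x : Int => x) with
      | none => simp [PySem.List.max?_eq_none_iff] at hcase
      | some m' => exact ⟨m', rfl⟩
    have hmem := PySem.List.max?_mem hm
    have hmax := PySem.List.max?_isMax hm
    have hmax' := PySem.List.max?_isMax hm'
    have h1 : m' ≤ m := hmax m' (List.mem_append.mpr (Or.inl (PySem.List.max?_mem hm')))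
    have h2 : a ≤ m := hmax a (List.mem_append.mpr (Or.inr (by simp)))
    have h3 : m ≤ max m' a := by
      rcases List.mem_append.mp hmem with hml | hma
      · exact le_trans (hmax' m hml) (le_max_left _ _)
      · simp at hma; omega
    simp only [PySem.List.maxD, hm, hm', Option.getD_some]
    omega

theorem pvMtop_nil (cmp : Int → Int → Bool) : pvMtop cmp [] = 0 := by
  simp [pvMtop, pvDpIdeal, PySem.List.maxD, PySem.List.max?]

theorem pvMtop_snoc (cmp : Int → Int → Bool) (p : List Int) (x : Int) :
    pvMtop cmp (p ++ [x]) = max (pvMtop cmp p) (1 + pvM cmp p x) := by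
  rw [pvMtop, pvDpIdeal_snoc, pvMaxD_append_singleton _ _ (by have := pvM_nonneg cmp p x; omega)]
  rfl

-- the inner 'max(dp[j] for j, prev in enumerate(p) if cmp(v, prev))' equals pvM cmp p v
theorem pvInner (cmp : Int → Int → Bool) (v : Int) (p dp : List Int)
    (hdp : ∀ k, k < p.length → PySem.List.pyGetD dp (k : Int) 0 = 1 + pvM cmp (p.take k) (p.getD k 0)) :
    PySem.List.maxD ((PySem.List.enumerate p).filterMap
        (fun jp => if cmp v jp.2 then some (PySem.List.pyGetD dp jp.1 0) else none))
      (fun x => x) 0 = pvM cmp p v := by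
  revert hdp
  induction p using List.reverseRecOn with
  | nil =>
    intro _
    simp [PySem.List.enumerate_nil, pvM_nil, PySem.List.maxD, PySem.List.max?]
  | append_singleton p x ih =>
    intro hdp
    have hdp' : ∀ k, k < p.length → PySem.List.pyGetD dp (k : Int) 0 = 1 + pvM cmp (p.take k) (p.getD k 0) := by
      intro k hk
      have h := hdp k (by simp; omega)
      rwa [List.take_append_of_le_length (le_of_lt hk),
        show (p ++ [x]).getD k 0 = p.getD k 0 from by
          rw [List.getD_eq_getElem _ _ (by simp; omega), List.getD_eq_getElem _ _ hk,
            List.getElem_append_left hk]] at h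
    have hval : PySem.List.pyGetD dp ((p.length : Nat) : Int) 0 = 1 + pvM cmp p x := by
      have h := hdp p.length (by simp)
      rwa [List.take_left,
        show (p ++ [x]).getD p.length 0 = x from by
          rw [List.getD_eq_getElem _ _ (by simp)]; simp] at h
    rw [PySem.List.enumerate_append, PySem.List.enumerate_cons, PySem.List.enumerate_nil,
      List.filterMap_append]
    by_cases hc : cmp v x
    · simp only [List.filterMap_cons, List.filterMap_nil, hc, if_pos]
      rw [show (0 + (p.length : Int)) = ((p.length : Nat) : Int) from by omega, hval]
      rw [pvMaxD_append_singleton _ _ (by have := pvM_nonneg cmp p x; omega)]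
      rw [ih hdp', pvM_snoc, if_pos hc]
    · simp only [List.filterMap_cons, List.filterMap_nil, hc, if_neg, Bool.false_eq_true,
        not_false_eq_true, List.append_nil]
      rw [ih hdp', pvM_snoc, if_neg (by simp [hc])]

-- A's fold, started after prefix p, completes the ideal dp list
theorem pvFoldA (cmp : Int → Int → Bool) (rest : List Int) : ∀ (p : List Int),
    List.foldl (pvStepA cmp (p ++ rest)) (pvDpIdeal cmp p ++ List.replicate rest.length 1)
      (PySem.List.enumerate rest (p.length : Int)) = pvDpIdeal cmp (p ++ rest) := by
  induction rest with
  | nil => intro p; simp [PySem.List.enumerate_nil]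
  | cons x rest ih =>
    intro p
    rw [PySem.List.enumerate_cons, List.foldl_cons]
    have hstep : pvStepA cmp (p ++ x :: rest) (pvDpIdeal cmp p ++ List.replicate (x :: rest).length 1)
        ((p.length : Int), x) = pvDpIdeal cmp (p ++ [x]) ++ List.replicate rest.length 1 := by
      by_cases hp : p = []
      · subst hp
        simp only [pvStepA]
        rw [if_neg (by simp)]
        have h1 : pvDpIdeal cmp [x] = [1] := by
          simp [pvDpIdeal, pvM, pvMr]
        simp [h1, pvDpIdeal_nil, List.replicate_succ]
      · have hlen : 0 < p.length := List.length_pos_iff.mpr hp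
        simp only [pvStepA]
        rw [if_pos (by exact_mod_cast hlen)]
        have hslice : PySem.List.slice (p ++ x :: rest) none (some ((p.length : Nat) : Int)) = p := by
          rw [PySem.List.slice_to _ (by positivity), Int.toNat_natCast]
          exact List.take_left
        have hdp : ∀ k, k < p.length →
            PySem.List.pyGetD (pvDpIdeal cmp p ++ List.replicate (x :: rest).length 1) (k : Int) 0
              = 1 + pvM cmp (p.take k) (p.getD k 0) := by
          intro k hk
          rw [PySem.List.pyGetD_natCast]
          rw [List.getD_eq_getElem _ _ (by rw [List.length_append, pvDpIdeal_length]; omega)]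
          rw [List.getElem_append_left (by rw [pvDpIdeal_length]; omega)]
          exact pvDpIdeal_getElem cmp p k (by rw [pvDpIdeal_length]; omega)
        have hinner := pvInner cmp x p (pvDpIdeal cmp p ++ List.replicate (x :: rest).length 1) hdp
        rw [hslice, hinner, PySem.List.pySetD_natCast]
        rw [List.set_append_right _ _ (le_of_eq (pvDpIdeal_length cmp p))]
        rw [pvDpIdeal_length, Nat.sub_self, List.length_cons, List.replicate_succ, List.set_cons_zero]
        rw [show pvDpIdeal cmp p ++ (1 + pvM cmp p x) :: List.replicate rest.length 1
              = (pvDpIdeal cmp p ++ [1 + pvM cmp p x]) ++ List.replicate rest.length 1 from by simp]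
        rw [← pvDpIdeal_snoc]
    rw [hstep]
    have h := ih (p ++ [x])
    have e1 : (p ++ [x]) ++ rest = p ++ x :: rest := by simp
    have e2 : (((p ++ [x]).length : Nat) : Int) = (p.length : Int) + 1 := by simp
    rw [e1, e2] at h
    exact h

theorem pvBuildDp_eq (cmp : Int → Int → Bool) (array : List Int) :
    pvBuildDp cmp array = pvDpIdeal cmp array := by
  have h := pvFoldA cmp array []
  simpa [pvBuildDp, pvDpIdeal_nil] using h

-- dec direction on p = inc direction on the negated list
theorem pvMr_neg (r : List Int) (v : Int) :
    pvMr pvLeCmp r v = pvMr pvGeCmp (r.map (fun x => -x)) (-v) := by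
  induction r generalizing v with
  | nil => simp [pvMr]
  | cons x r ih =>
    simp only [pvMr, List.map_cons, pvLeCmp, pvGeCmp]
    by_cases hvx : v ≤ x
    · rw [if_pos (by simpa using hvx), if_pos (by simp [hvx]), ih, ih]
    · rw [if_neg (by simpa using hvx), if_neg (by simp [hvx]), ih]

theorem pvM_neg (p : List Int) (v : Int) :
    pvM pvLeCmp p v = pvM pvGeCmp (p.map (fun x => -x)) (-v) := by
  simp [pvM, ← List.map_reverse, pvMr_neg]

theorem pvDpIdeal_neg (p : List Int) :
    pvDpIdeal pvLeCmp p = pvDpIdeal pvGeCmp (p.map (fun x => -x)) := by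
  unfold pvDpIdeal
  rw [List.length_map]
  refine List.map_congr_left ?_
  intro k hk
  rw [List.mem_range] at hk
  rw [pvM_neg]
  have h1 : (p.map (fun x => -x)).take k = (p.take k).map (fun x => -x) := by
    rw [List.map_take]
  have h2 : (p.map (fun x => -x)).getD k 0 = -(p.getD k 0) := by
    rw [List.getD_eq_getElem _ _ (by simpa using hk), List.getD_eq_getElem _ _ hk,
      List.getElem_map]
  rw [h1, h2]

theorem pvMtop_neg (p : List Int) :
    pvMtop pvLeCmp p = pvMtop pvGeCmp (p.map (fun x => -x)) := by
  simp [pvMtop, pvDpIdeal_neg]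

-- sorted lists: the elements ≤ v are exactly an initial segment of length countP
theorem pvSortedCount (t : List Int) (ht : t.Pairwise (· ≤ ·)) (v : Int) :
    ∀ j, (hj : j < t.length) → (t[j] ≤ v ↔ j < t.countP (fun y => decide (y ≤ v))) := by
  induction t with
  | nil => intro j hj; simp at hj
  | cons b t ih =>
    intro j hj
    have hb := List.pairwise_cons.mp ht
    rw [List.countP_cons]
    by_cases hbv : b ≤ v
    · rw [if_pos (show (fun y => decide (y ≤ v)) b = true by simp [hbv])]
      cases j with
      | zero => simp [hbv]
      | succ i =>
        have hi : i < t.length := by simpa using Nat.lt_of_succ_lt_succ hj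
        simp only [List.getElem_cons_succ]
        rw [ih hb.2 i hi]
        omega
    · have hzero : t.countP (fun y => decide (y ≤ v)) = 0 := by
        rw [List.countP_eq_zero]
        intro y hy
        have := hb.1 y hy
        simp only [decide_eq_true_eq]
        omega
      have hnot : ¬ ((b :: t)[j] ≤ v) := by
        cases j with
        | zero => simpa using hbv
        | succ i =>
          have hi : i < t.length := by simpa using Nat.lt_of_succ_lt_succ hj
          simp only [List.getElem_cons_succ]
          have := hb.1 t[i] (List.getElem_mem hi)
          omega
      rw [if_neg (show ¬ ((fun y => decide (y ≤ v)) b = true) by simp [hbv])]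
      simp [hnot, hzero]

theorem pvBrEq (t : List Int) (ht : t.Pairwise (· ≤ ·)) (v : Int) (k : Nat) (hk : k ≤ t.length)
    (h1 : ∀ j, (hj : j < t.length) → j < k → t[j] ≤ v)
    (h2 : ∀ j, (hj : j < t.length) → k ≤ j → v < t[j]) :
    PySem.List.bisectRight t v = k := by
  obtain ⟨hb, hb1, hb2⟩ := PySem.List.bisectRight_spec t v ht
  by_contra hne
  rcases Nat.lt_or_ge (PySem.List.bisectRight t v) k with hlt | hge
  · have hjlen : PySem.List.bisectRight t v < t.length := lt_of_lt_of_le hlt hk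
    exact absurd (h1 _ hjlen hlt) (not_le.mpr (hb2 _ hjlen (le_refl _)))
  · have hklt : k < PySem.List.bisectRight t v := lt_of_le_of_ne hge (Ne.symm hne)
    have hklen : k < t.length := lt_of_lt_of_le hklt hb
    exact absurd (hb1 _ hklen hklt) (not_le.mpr (h2 _ hklen (le_refl _)))

theorem pvBrCount (t : List Int) (ht : t.Pairwise (· ≤ ·)) (v : Int) :
    PySem.List.bisectRight t v = t.countP (fun y => decide (y ≤ v)) := by
  refine pvBrEq t ht v _ List.countP_le_length ?_ ?_
  · intro j hj hlt; exact (pvSortedCount t ht v j hj).mpr hlt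
  · intro j hj hge
    by_contra hle
    exact absurd ((pvSortedCount t ht v j hj).mp (not_lt.mp hle)) (by omega)

-- the invariant tying B's tails list to the dp quantities of the processed prefix p
def pvInv (p t : List Int) : Prop :=
  t.Pairwise (· ≤ ·) ∧
  (∀ v : Int, ((t.countP (fun y => decide (y ≤ v)) : Int) = pvM pvGeCmp p v)) ∧
  ((t.length : Int) = pvMtop pvGeCmp p)

theorem pvStepInv (p t : List Int) (x : Int) (h : pvInv p t) :
    pvInv (p ++ [x]) (pvTailsStep t x) := by
  obtain ⟨hs, hc, hl⟩ := h
  have hbr : PySem.List.bisectRight t x = t.countP (fun y => decide (y ≤ x)) := pvBrCount t hs x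
  have hcx : ((t.countP (fun y => decide (y ≤ x)) : Nat) : Int) = pvM pvGeCmp p x := hc x
  have hchar := pvSortedCount t hs
  have hMsnoc : ∀ v, pvM pvGeCmp (p ++ [x]) v
      = if x ≤ v then max (pvM pvGeCmp p v) (1 + pvM pvGeCmp p x) else pvM pvGeCmp p v := by
    intro v
    rw [pvM_snoc]
    simp [pvGeCmp]
  unfold pvTailsStep
  by_cases hpos : PySem.List.bisectRight t x = t.length
  · rw [if_pos hpos]
    have hxc : t.countP (fun y => decide (y ≤ x)) = t.length := by omega
    have hall : ∀ y ∈ t, y ≤ x := by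
      intro y hy
      have := List.countP_eq_length.mp hxc y hy
      simpa using this
    refine ⟨?_, ?_, ?_⟩
    · rw [List.pairwise_append]
      exact ⟨hs, by simp, fun a ha b hb => by simp at hb; subst hb; exact hall a ha⟩
    · intro v
      rw [List.countP_append, List.countP_cons, List.countP_nil, hMsnoc v]
      have h1 := hc v
      by_cases hxv : x ≤ v
      · rw [if_pos hxv, if_pos (show (fun y => decide (y ≤ v)) x = true by simp [hxv])]
        have hctv : t.countP (fun y => decide (y ≤ v)) = t.length :=
          List.countP_eq_length.mpr
            (fun y hy => by simp only [decide_eq_true_eq]; exact le_trans (hall y hy) hxv)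
        rw [← h1, ← hcx]
        simp only [max_def]
        split_ifs <;> push_cast <;> omega
      · rw [if_neg hxv, if_neg (show ¬ ((fun y => decide (y ≤ v)) x = true) by simp [hxv])]
        rw [← h1]
        push_cast
        omega
    · rw [List.length_append, pvMtop_snoc, ← hl, ← hcx, hxc]
      simp only [List.length_cons, List.length_nil, max_def]
      split_ifs <;> push_cast <;> omega
  · rw [if_neg hpos]
    have hble := (PySem.List.bisectRight_spec t x hs).1
    have hposlt : PySem.List.bisectRight t x < t.length := lt_of_le_of_ne hble hpos
    set m := PySem.List.bisectRight t x with hmdef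
    have hmc : m = t.countP (fun y => decide (y ≤ x)) := hbr
    have htm_gt : x < t[m] := by
      have hch := hchar x m hposlt
      by_contra hle
      have := hch.mp (by omega)
      omega
    have hdecomp : t = t.take m ++ t[m] :: t.drop (m + 1) := by
      conv_lhs => rw [← List.take_append_drop m t]
      rw [List.getElem_cons_drop hposlt]
    have hset : t.set m x = t.take m ++ x :: t.drop (m + 1) := by
      rw [List.set_eq_take_append_cons_drop, if_pos hposlt]
    have htake_le : ∀ y ∈ t.take m, y ≤ x := by
      intro y hy
      obtain ⟨j, hj, rfl⟩ := List.getElem_of_mem hy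
      have hjm : j < m := by
        have := hj
        rw [List.length_take] at this
        omega
      rw [List.getElem_take]
      exact (hchar x j (by omega)).mpr (by omega)
    have hdrop_ge : ∀ y ∈ t.drop (m + 1), t[m] ≤ y := by
      have hs' := hs
      rw [hdecomp] at hs'
      have h2 := (List.pairwise_append.mp hs').2.1
      exact fun y hy => (List.pairwise_cons.mp h2).1 y hy
    have hcv_decomp : ∀ v, t.countP (fun y => decide (y ≤ v))
        = (t.take m).countP (fun y => decide (y ≤ v))
          + ((if (fun y => decide (y ≤ v)) t[m] = true then 1 else 0)
             + (t.drop (m+1)).countP (fun y => decide (y ≤ v))) := by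
      intro v
      conv_lhs => rw [hdecomp]
      rw [List.countP_append, List.countP_cons]
      simp only [decide_eq_true_eq]
      omega
    refine ⟨?_, ?_, ?_⟩
    · rw [hset, List.pairwise_append]
      refine ⟨List.Pairwise.sublist (List.take_sublist _ _) hs, ?_, ?_⟩
      · rw [List.pairwise_cons]
        exact ⟨fun y hy => le_trans (le_of_lt htm_gt) (hdrop_ge y hy),
               List.Pairwise.sublist (List.drop_sublist _ _) hs⟩
      · intro a ha b hb
        have hax : a ≤ x := htake_le a ha
        rcases List.mem_cons.mp hb with rfl | hb'
        · exact hax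
        · exact le_trans hax (le_trans (le_of_lt htm_gt) (hdrop_ge b hb'))
    · intro v
      rw [hset, List.countP_append, List.countP_cons, hMsnoc v]
      have hcv := hc v
      have hdec := hcv_decomp v
      by_cases hxv : x ≤ v
      · rw [if_pos hxv, if_pos (show (fun y => decide (y ≤ v)) x = true by simp [hxv])]
        by_cases htmv : t[m] ≤ v
        · have hmlt : m < t.countP (fun y => decide (y ≤ v)) := (hchar v m hposlt).mp htmv
          rw [if_pos (show (fun y => decide (y ≤ v)) t[m] = true by simp [htmv])] at hdec
          rw [← hcv, ← hcx, ← hmc]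
          simp only [max_def]
          split_ifs <;> push_cast <;> omega
        · have hA : (t.take m).countP (fun y => decide (y ≤ v)) = m := by
            rw [List.countP_eq_length.mpr (fun y hy => by
              simp only [decide_eq_true_eq]
              exact le_trans (htake_le y hy) hxv), List.length_take]
            omega
          have hB : (t.drop (m+1)).countP (fun y => decide (y ≤ v)) = 0 := by
            rw [List.countP_eq_zero]
            intro y hy
            have := hdrop_ge y hy
            simp only [decide_eq_true_eq]
            omega
          rw [if_neg (show ¬ ((fun y => decide (y ≤ v)) t[m] = true) by simp [htmv])] at hdec
          rw [← hcv, ← hcx, ← hmc]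
          simp only [max_def]
          split_ifs <;> push_cast <;> omega
      · have htmv : ¬ t[m] ≤ v := by omega
        rw [if_neg hxv, if_neg (show ¬ ((fun y => decide (y ≤ v)) x = true) by simp [hxv])]
        rw [if_neg (show ¬ ((fun y => decide (y ≤ v)) t[m] = true) by simp [htmv])] at hdec
        rw [← hcv]
        push_cast
        omega
    · rw [hset, pvMtop_snoc]
      have hlen2 : (t.take m ++ x :: t.drop (m+1)).length = t.length := by
        rw [← hset, List.length_set]
      rw [hlen2, ← hl, ← hcx, ← hmc]
      simp only [max_def]
      split_ifs <;> push_cast <;> omega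

theorem pvFoldB (rest : List Int) : ∀ (p t : List Int), pvInv p t →
    pvInv (p ++ rest) (List.foldl pvTailsStep t rest) := by
  induction rest with
  | nil => intro p t h; simpa using h
  | cons x rest ih =>
    intro p t h
    have h2 := ih (p ++ [x]) (pvTailsStep t x) (pvStepInv p t x h)
    simpa using h2

theorem pvInv_nil : pvInv [] [] := by
  refine ⟨List.Pairwise.nil, ?_, ?_⟩
  · intro v; simp [pvM_nil]
  · simp [pvMtop_nil]

theorem pvLnds_length (a : List Int) : ((pvLnds a).length : Int) = pvMtop pvGeCmp a := by
  have h := pvFoldB a [] [] pvInv_nil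
  simp only [List.nil_append] at h
  exact h.2.2

-- the two programs agree
theorem pvMain (array : List Int) : min_removals_pythonic array = min_removals_pythonic_alt array := by
  by_cases hlen : array.length ≤ 1
  · rcases array with _ | ⟨a, _ | ⟨b, rest⟩⟩
    · simp [min_removals_pythonic, min_removals_pythonic_alt, pvLnds]
    · have h1 : ∀ c : Int, pvLnds [c] = [c] := by
        intro c
        simp only [pvLnds, List.foldl_cons, List.foldl_nil, pvTailsStep]
        rw [pvBrCount [] List.Pairwise.nil c]
        simp
      simp [min_removals_pythonic, min_removals_pythonic_alt, h1]
    · exfalso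
      simp only [List.length_cons] at hlen
      omega
  · have hA : min_removals_pythonic array
        = (array.length : Int) - max (pvMtop pvGeCmp array) (pvMtop pvLeCmp array) := by
      simp only [min_removals_pythonic, if_neg hlen, pvBuildDp_eq]
      rfl
    have hB : min_removals_pythonic_alt array
        = (array.length : Int)
          - max (pvMtop pvGeCmp array) (pvMtop pvGeCmp (array.map (fun x => -x))) := by
      rw [min_removals_pythonic_alt, pvLnds_length, pvLnds_length]
    rw [hA, hB, pvMtop_neg]

-- ===== VERDICT (by name: the statement is the Claim_ definition above) =====
theorem min_removals_pythonic_spec : Claim_equal_min_removals_pythonic := by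
  intro array _
  unfold Spec_min_removals_pythonic
  exact pvMain array
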